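-- pv_equiv track=rewrite | github.com/Omar-Magdy-AHNT/Multi-UAV-Path-Planning-Optimization | TLBO/TLBO_Const4.py | bresenham_3d
-- ===== SOURCE A (Python) =====
-- def bresenham_3d(p1, p2):
--     # Using a generator to yield points one-by-one
--     x1, y1, z1 = p1
--     x2, y2, z2 = p2
--     # Differences
--     dx = abs(x2 - x1)
--     dy = abs(y2 - y1)
--     dz = abs(z2 - z1)
--
--     # Signs of increments (direction of the line)
--     sx = 1 if x2 > x1 else -1
--     sy = 1 if y2 > y1 else -1
--     sz = 1 if z2 > z1 else -1
--
--     # Initialize the error terms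
--     if dx >= dy and dx >= dz:        # x is the major axis
--         err_1 = 2 * dy - dx
--         err_2 = 2 * dz - dx
--         while x1 != x2:  # Stop when x1 reaches x2
--             yield (x1, y1, z1)  # Points are already integers
--             x1 += sx
--             if err_1 >= 0:
--                 y1 += sy
--                 err_1 -= 2 * dx
--             if err_2 >= 0:
--                 z1 += sz
--                 err_2 -= 2 * dx
--             err_1 += 2 * dy
--             err_2 += 2 * dz
--     elif dy >= dx and dy >= dz:      # y is the major axis
--         err_1 = 2 * dx - dy
--         err_2 = 2 * dz - dy
--         while y1 != y2:  # Stop when y1 reaches y2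
--             yield (x1, y1, z1)  # Points are already integers
--             y1 += sy
--             if err_1 >= 0:
--                 x1 += sx
--                 err_1 -= 2 * dy
--             if err_2 >= 0:
--                 z1 += sz
--                 err_2 -= 2 * dy
--             err_1 += 2 * dx
--             err_2 += 2 * dz
--     else:                            # z is the major axis
--         err_1 = 2 * dx - dz
--         err_2 = 2 * dy - dz
--         while z1 != z2:  # Stop when z1 reaches z2
--             yield (x1, y1, z1)  # Points are already integers
--             z1 += sz
--             if err_1 >= 0:
--                 x1 += sx
--                 err_1 -= 2 * dz
--             if err_2 >= 0:
--                 y1 += sy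
--                 err_2 -= 2 * dz
--             err_1 += 2 * dx
--             err_2 += 2 * dy
-- ===== SOURCE B (Python) =====
-- def bresenham_3d(p1, p2):
--     # closed-form Bresenham: i-th point computed directly from the index
--     x1, y1, z1 = p1
--     x2, y2, z2 = p2
--     dx = abs(x2 - x1)
--     dy = abs(y2 - y1)
--     dz = abs(z2 - z1)
--     sx = 1 if x2 > x1 else -1
--     sy = 1 if y2 > y1 else -1
--     sz = 1 if z2 > z1 else -1
--     if dx >= dy and dx >= dz:
--         for i in range(dx):
--             yield (x1 + i * sx,
--                    y1 + sy * ((2 * i * dy + dx) // (2 * dx)),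
--                    z1 + sz * ((2 * i * dz + dx) // (2 * dx)))
--     elif dy >= dx and dy >= dz:
--         for i in range(dy):
--             yield (x1 + sx * ((2 * i * dx + dy) // (2 * dy)),
--                    y1 + i * sy,
--                    z1 + sz * ((2 * i * dz + dy) // (2 * dy)))
--     else:
--         for i in range(dz):
--             yield (x1 + sx * ((2 * i * dx + dz) // (2 * dz)),
--                    y1 + sy * ((2 * i * dy + dz) // (2 * dz)),
--                    z1 + i * sz)
-- ===== Notes on version B (the rewrite author's own statement) =====
-- stated objective: alternative
-- what changed: Replaces A's two incremental Bresenham error accumulators with a direct index-to-coordinate closed-form: the i-th point's minor-axis offsets are computed as sign*((2*i*d_minor + d_major)//(2*d_major)), so each point is a pure function of its index instead of mutated loop state.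
import Mathlib
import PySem

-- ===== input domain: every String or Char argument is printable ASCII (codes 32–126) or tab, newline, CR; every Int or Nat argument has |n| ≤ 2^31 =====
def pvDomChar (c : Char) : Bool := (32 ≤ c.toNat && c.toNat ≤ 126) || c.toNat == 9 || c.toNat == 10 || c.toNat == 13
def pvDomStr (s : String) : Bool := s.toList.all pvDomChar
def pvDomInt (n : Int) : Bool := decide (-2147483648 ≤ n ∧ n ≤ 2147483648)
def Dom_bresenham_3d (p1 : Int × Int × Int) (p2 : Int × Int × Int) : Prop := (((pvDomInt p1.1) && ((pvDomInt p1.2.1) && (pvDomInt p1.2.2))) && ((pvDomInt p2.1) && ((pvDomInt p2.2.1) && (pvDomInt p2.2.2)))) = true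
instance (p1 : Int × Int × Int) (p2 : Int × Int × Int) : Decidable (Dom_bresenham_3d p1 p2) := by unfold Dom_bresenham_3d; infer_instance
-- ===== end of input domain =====

-- B replaces A's incremental error accumulators with a closed-form index-to-coordinate
-- formula for each point (objective: alternative, same O(n) cost). Both are generators in
-- Python; here both are the list of yielded points.

-- ===== PORT A =====
-- A's three while-loops, one per major axis; fuel is the exact number of iterations
-- (the major-axis absolute difference), the `x1 = x2` guard is A's loop condition.
def pvLoopX (fuel : Nat) (x1 y1 z1 x2 sx sy sz dx dy dz e1 e2 : Int) : List (Int × Int × Int) :=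
  match fuel with
  | 0 => []
  | n+1 =>
    if x1 = x2 then [] else
      (x1, y1, z1) ::
        pvLoopX n (x1 + sx)
          (if 0 ≤ e1 then y1 + sy else y1) (if 0 ≤ e2 then z1 + sz else z1)
          x2 sx sy sz dx dy dz
          ((if 0 ≤ e1 then e1 - 2*dx else e1) + 2*dy)
          ((if 0 ≤ e2 then e2 - 2*dx else e2) + 2*dz)

def pvLoopY (fuel : Nat) (x1 y1 z1 y2 sx sy sz dx dy dz e1 e2 : Int) : List (Int × Int × Int) :=
  match fuel with
  | 0 => []
  | n+1 =>
    if y1 = y2 then [] else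
      (x1, y1, z1) ::
        pvLoopY n (if 0 ≤ e1 then x1 + sx else x1) (y1 + sy)
          (if 0 ≤ e2 then z1 + sz else z1)
          y2 sx sy sz dx dy dz
          ((if 0 ≤ e1 then e1 - 2*dy else e1) + 2*dx)
          ((if 0 ≤ e2 then e2 - 2*dy else e2) + 2*dz)

def pvLoopZ (fuel : Nat) (x1 y1 z1 z2 sx sy sz dx dy dz e1 e2 : Int) : List (Int × Int × Int) :=
  match fuel with
  | 0 => []
  | n+1 =>
    if z1 = z2 then [] else
      (x1, y1, z1) ::
        pvLoopZ n (if 0 ≤ e1 then x1 + sx else x1)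
          (if 0 ≤ e2 then y1 + sy else y1) (z1 + sz)
          z2 sx sy sz dx dy dz
          ((if 0 ≤ e1 then e1 - 2*dz else e1) + 2*dx)
          ((if 0 ≤ e2 then e2 - 2*dz else e2) + 2*dy)

def bresenham_3d (p1 : Int × Int × Int) (p2 : Int × Int × Int) : List (Int × Int × Int) :=
  let x1 := p1.1; let y1 := p1.2.1; let z1 := p1.2.2
  let x2 := p2.1; let y2 := p2.2.1; let z2 := p2.2.2
  let dx := |x2 - x1|
  let dy := |y2 - y1|
  let dz := |z2 - z1|
  let sx : Int := if x1 < x2 then 1 else -1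
  let sy : Int := if y1 < y2 then 1 else -1
  let sz : Int := if z1 < z2 then 1 else -1
  if dy ≤ dx ∧ dz ≤ dx then
    pvLoopX dx.natAbs x1 y1 z1 x2 sx sy sz dx dy dz (2*dy - dx) (2*dz - dx)
  else if dx ≤ dy ∧ dz ≤ dy then
    pvLoopY dy.natAbs x1 y1 z1 y2 sx sy sz dx dy dz (2*dx - dy) (2*dz - dy)
  else
    pvLoopZ dz.natAbs x1 y1 z1 z2 sx sy sz dx dy dz (2*dx - dz) (2*dy - dz)

-- ===== PORT B =====
def bresenham_3d_alt (p1 : Int × Int × Int) (p2 : Int × Int × Int) : List (Int × Int × Int) :=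
  let x1 := p1.1; let y1 := p1.2.1; let z1 := p1.2.2
  let x2 := p2.1; let y2 := p2.2.1; let z2 := p2.2.2
  let dx := |x2 - x1|
  let dy := |y2 - y1|
  let dz := |z2 - z1|
  let sx : Int := if x1 < x2 then 1 else -1
  let sy : Int := if y1 < y2 then 1 else -1
  let sz : Int := if z1 < z2 then 1 else -1
  if dy ≤ dx ∧ dz ≤ dx then
    (List.range dx.toNat).map (fun (i : Nat) =>
      (x1 + (i : Int) * sx,
       y1 + sy * PySem.Int.floordiv (2*(i : Int)*dy + dx) (2*dx),
       z1 + sz * PySem.Int.floordiv (2*(i : Int)*dz + dx) (2*dx)))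
  else if dx ≤ dy ∧ dz ≤ dy then
    (List.range dy.toNat).map (fun (i : Nat) =>
      (x1 + sx * PySem.Int.floordiv (2*(i : Int)*dx + dy) (2*dy),
       y1 + (i : Int) * sy,
       z1 + sz * PySem.Int.floordiv (2*(i : Int)*dz + dy) (2*dy)))
  else
    (List.range dz.toNat).map (fun (i : Nat) =>
      (x1 + sx * PySem.Int.floordiv (2*(i : Int)*dx + dz) (2*dz),
       y1 + sy * PySem.Int.floordiv (2*(i : Int)*dy + dz) (2*dz),
       z1 + (i : Int) * sz))

-- ===== PRECONDITION & SPEC =====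
def Spec_bresenham_3d (p1 : Int × Int × Int) (p2 : Int × Int × Int) (out : List (Int × Int × Int)) : Prop := out = bresenham_3d_alt p1 p2
instance (p1 : Int × Int × Int) (p2 : Int × Int × Int) (out : List (Int × Int × Int)) : Decidable (Spec_bresenham_3d p1 p2 out) := by unfold Spec_bresenham_3d; infer_instance

-- ===== CLAIM (what is proved, stated in full; the proofs are below) =====
def Claim_equal_bresenham_3d : Prop := ∀ (p1 : Int × Int × Int) (p2 : Int × Int × Int), Dom_bresenham_3d p1 p2 → Spec_bresenham_3d p1 p2 (bresenham_3d p1 p2)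

-- ===== LEMMAS AND PROOFS =====

-- the closed-form minor-axis step count at index i (quotient by the doubled major difference)
def pvC (dmaj dmin i : Int) : Int := (2*i*dmin + dmaj) / (2*dmaj)

-- A's error accumulator at the start of step i, expressed through pvC
def pvE (dmaj dmin i : Int) : Int := 2*(i+1)*dmin - dmaj - 2*dmaj * pvC dmaj dmin i

lemma pvC_zero (dmaj dmin : Int) (h : 0 < dmaj) : pvC dmaj dmin 0 = 0 := by
  unfold pvC
  have : 2*(0:Int)*dmin + dmaj = dmaj := by ring
  rw [this]
  exact Int.ediv_eq_zero_of_lt (by omega) (by omega)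

lemma pvCstep (dmaj dmin k : Int) (h1 : 0 < dmaj) (h2 : 0 ≤ dmin) (h3 : dmin ≤ dmaj) :
    pvC dmaj dmin (k+1) = pvC dmaj dmin k + (if 0 ≤ pvE dmaj dmin k then 1 else 0) := by
  have hb : (0:Int) < 2*dmaj := by omega
  set a : Int := 2*k*dmin + dmaj with ha
  set q : Int := a / (2*dmaj) with hq
  set r : Int := a % (2*dmaj) with hr
  have hdm : 2*dmaj*q + r = a := Int.mul_ediv_add_emod a (2*dmaj)
  have hr0 : 0 ≤ r := Int.emod_nonneg a (by omega)
  have hr1 : r < 2*dmaj := Int.emod_lt_of_pos a hb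
  have hE : pvE dmaj dmin k = r + 2*dmin - 2*dmaj := by
    unfold pvE pvC; rw [← hq]; linarith [hdm]
  have hnum : 2*(k+1)*dmin + dmaj = a + 2*dmin := by rw [ha]; ring
  unfold pvC
  rw [hnum, ← hq]
  by_cases he : 0 ≤ pvE dmaj dmin k
  · rw [hE] at he
    have hrepr : a + 2*dmin = (r + 2*dmin - 2*dmaj) + 2*dmaj*(q+1) := by linarith [hdm]
    rw [hrepr, Int.add_mul_ediv_left _ _ (show (2*dmaj) ≠ 0 by omega),
        Int.ediv_eq_zero_of_lt he (by omega), if_pos (by rw [hE]; exact he)]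
    ring
  · rw [hE] at he
    have hrepr : a + 2*dmin = (r + 2*dmin) + 2*dmaj*q := by linarith [hdm]
    rw [hrepr, Int.add_mul_ediv_left _ _ (show (2*dmaj) ≠ 0 by omega),
        Int.ediv_eq_zero_of_lt (by omega) (by omega), if_neg (by rw [hE]; exact he)]
    ring

lemma pvEstep (dmaj dmin k : Int) (h1 : 0 < dmaj) (h2 : 0 ≤ dmin) (h3 : dmin ≤ dmaj) :
    pvE dmaj dmin (k+1) = (if 0 ≤ pvE dmaj dmin k then pvE dmaj dmin k - 2*dmaj else pvE dmaj dmin k) + 2*dmin := by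
  have hc := pvCstep dmaj dmin k h1 h2 h3
  unfold pvE at *
  rw [hc]
  split_ifs <;> ring

lemma pvLoopX_eq (x1 y1 z1 sx sy sz dx dy dz : Int)
    (hdx : 0 < dx) (hdy : 0 ≤ dy) (hdz : 0 ≤ dz) (h1 : dy ≤ dx) (h2 : dz ≤ dx)
    (hsx : sx = 1 ∨ sx = -1) :
    ∀ (n : Nat) (k : Nat), (k : Int) + n = dx →
    pvLoopX n (x1 + (k:Int)*sx) (y1 + sy * pvC dx dy k) (z1 + sz * pvC dx dz k)
      (x1 + sx*dx) sx sy sz dx dy dz (pvE dx dy k) (pvE dx dz k)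
    = (List.range n).map (fun (j : Nat) =>
        (x1 + ((k:Int) + (j:Int))*sx, y1 + sy * pvC dx dy ((k:Int)+(j:Int)), z1 + sz * pvC dx dz ((k:Int)+(j:Int)))) := by
  intro n
  induction n with
  | zero => intro k hk; simp [pvLoopX]
  | succ n ih =>
    intro k hk
    have hguard : x1 + (k:Int)*sx ≠ x1 + sx*dx := by
      rcases hsx with h | h <;> rw [h] <;> intro hc <;> omega
    rw [pvLoopX, if_neg hguard, List.range_succ_eq_map, List.map_cons, List.map_map]
    have hy : (if 0 ≤ pvE dx dy k then y1 + sy * pvC dx dy k + sy else y1 + sy * pvC dx dy k)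
        = y1 + sy * pvC dx dy ((k:Int)+1) := by
      rw [pvCstep dx dy k hdx hdy h1]
      by_cases he : 0 ≤ pvE dx dy k <;> simp [he] <;> try ring
    have hz : (if 0 ≤ pvE dx dz k then z1 + sz * pvC dx dz k + sz else z1 + sz * pvC dx dz k)
        = z1 + sz * pvC dx dz ((k:Int)+1) := by
      rw [pvCstep dx dz k hdx hdz h2]
      by_cases he : 0 ≤ pvE dx dz k <;> simp [he] <;> try ring
    have he1 : ((if 0 ≤ pvE dx dy k then pvE dx dy k - 2*dx else pvE dx dy k) + 2*dy)
        = pvE dx dy ((k:Int)+1) := (pvEstep dx dy k hdx hdy h1).symm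
    have he2 : ((if 0 ≤ pvE dx dz k then pvE dx dz k - 2*dx else pvE dx dz k) + 2*dz)
        = pvE dx dz ((k:Int)+1) := (pvEstep dx dz k hdx hdz h2).symm
    have hx : x1 + (k:Int)*sx + sx = x1 + ((k+1:Nat):Int)*sx := by push_cast; ring
    have hk1 : ((k+1:Nat):Int) + n = dx := by push_cast; push_cast at hk; omega
    have hcast : ((k+1:Nat):Int) = (k:Int) + 1 := by push_cast; ring
    rw [hy, hz, he1, he2, hx, ← hcast, ih (k+1) hk1]
    refine congrArg₂ List.cons (by simp) ?_
    apply List.map_congr_left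
    intro j hj
    simp only [Function.comp_apply]
    have hjk : ((k+1:Nat):Int) + (j:Int) = (k:Int) + ((Nat.succ j : Nat):Int) := by push_cast; ring
    rw [hjk]

lemma pvLoopY_eq (x1 y1 z1 sx sy sz dx dy dz : Int)
    (hdy : 0 < dy) (hdx : 0 ≤ dx) (hdz : 0 ≤ dz) (h1 : dx ≤ dy) (h2 : dz ≤ dy)
    (hsy : sy = 1 ∨ sy = -1) :
    ∀ (n : Nat) (k : Nat), (k : Int) + n = dy →
    pvLoopY n (x1 + sx * pvC dy dx k) (y1 + (k:Int)*sy) (z1 + sz * pvC dy dz k)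
      (y1 + sy*dy) sx sy sz dx dy dz (pvE dy dx k) (pvE dy dz k)
    = (List.range n).map (fun (j : Nat) =>
        (x1 + sx * pvC dy dx ((k:Int)+(j:Int)), y1 + ((k:Int) + (j:Int))*sy, z1 + sz * pvC dy dz ((k:Int)+(j:Int)))) := by
  intro n
  induction n with
  | zero => intro k hk; simp [pvLoopY]
  | succ n ih =>
    intro k hk
    have hguard : y1 + (k:Int)*sy ≠ y1 + sy*dy := by
      rcases hsy with h | h <;> rw [h] <;> intro hc <;> omega
    rw [pvLoopY, if_neg hguard, List.range_succ_eq_map, List.map_cons, List.map_map]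
    have hx : (if 0 ≤ pvE dy dx k then x1 + sx * pvC dy dx k + sx else x1 + sx * pvC dy dx k)
        = x1 + sx * pvC dy dx ((k:Int)+1) := by
      rw [pvCstep dy dx k hdy hdx h1]
      by_cases he : 0 ≤ pvE dy dx k <;> simp [he] <;> try ring
    have hz : (if 0 ≤ pvE dy dz k then z1 + sz * pvC dy dz k + sz else z1 + sz * pvC dy dz k)
        = z1 + sz * pvC dy dz ((k:Int)+1) := by
      rw [pvCstep dy dz k hdy hdz h2]
      by_cases he : 0 ≤ pvE dy dz k <;> simp [he] <;> try ring
    have he1 : ((if 0 ≤ pvE dy dx k then pvE dy dx k - 2*dy else pvE dy dx k) + 2*dx)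
        = pvE dy dx ((k:Int)+1) := (pvEstep dy dx k hdy hdx h1).symm
    have he2 : ((if 0 ≤ pvE dy dz k then pvE dy dz k - 2*dy else pvE dy dz k) + 2*dz)
        = pvE dy dz ((k:Int)+1) := (pvEstep dy dz k hdy hdz h2).symm
    have hy : y1 + (k:Int)*sy + sy = y1 + ((k+1:Nat):Int)*sy := by push_cast; ring
    have hk1 : ((k+1:Nat):Int) + n = dy := by push_cast; push_cast at hk; omega
    have hcast : ((k+1:Nat):Int) = (k:Int) + 1 := by push_cast; ring
    rw [hx, hz, he1, he2, hy, ← hcast, ih (k+1) hk1]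
    refine congrArg₂ List.cons (by simp) ?_
    apply List.map_congr_left
    intro j hj
    simp only [Function.comp_apply]
    have hjk : ((k+1:Nat):Int) + (j:Int) = (k:Int) + ((Nat.succ j : Nat):Int) := by push_cast; ring
    rw [hjk]

lemma pvLoopZ_eq (x1 y1 z1 sx sy sz dx dy dz : Int)
    (hdz : 0 < dz) (hdx : 0 ≤ dx) (hdy : 0 ≤ dy) (h1 : dx ≤ dz) (h2 : dy ≤ dz)
    (hsz : sz = 1 ∨ sz = -1) :
    ∀ (n : Nat) (k : Nat), (k : Int) + n = dz →
    pvLoopZ n (x1 + sx * pvC dz dx k) (y1 + sy * pvC dz dy k) (z1 + (k:Int)*sz)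
      (z1 + sz*dz) sx sy sz dx dy dz (pvE dz dx k) (pvE dz dy k)
    = (List.range n).map (fun (j : Nat) =>
        (x1 + sx * pvC dz dx ((k:Int)+(j:Int)), y1 + sy * pvC dz dy ((k:Int)+(j:Int)), z1 + ((k:Int) + (j:Int))*sz)) := by
  intro n
  induction n with
  | zero => intro k hk; simp [pvLoopZ]
  | succ n ih =>
    intro k hk
    have hguard : z1 + (k:Int)*sz ≠ z1 + sz*dz := by
      rcases hsz with h | h <;> rw [h] <;> intro hc <;> omega
    rw [pvLoopZ, if_neg hguard, List.range_succ_eq_map, List.map_cons, List.map_map]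
    have hx : (if 0 ≤ pvE dz dx k then x1 + sx * pvC dz dx k + sx else x1 + sx * pvC dz dx k)
        = x1 + sx * pvC dz dx ((k:Int)+1) := by
      rw [pvCstep dz dx k hdz hdx h1]
      by_cases he : 0 ≤ pvE dz dx k <;> simp [he] <;> try ring
    have hy : (if 0 ≤ pvE dz dy k then y1 + sy * pvC dz dy k + sy else y1 + sy * pvC dz dy k)
        = y1 + sy * pvC dz dy ((k:Int)+1) := by
      rw [pvCstep dz dy k hdz hdy h2]
      by_cases he : 0 ≤ pvE dz dy k <;> simp [he] <;> try ring
    have he1 : ((if 0 ≤ pvE dz dx k then pvE dz dx k - 2*dz else pvE dz dx k) + 2*dx)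
        = pvE dz dx ((k:Int)+1) := (pvEstep dz dx k hdz hdx h1).symm
    have he2 : ((if 0 ≤ pvE dz dy k then pvE dz dy k - 2*dz else pvE dz dy k) + 2*dy)
        = pvE dz dy ((k:Int)+1) := (pvEstep dz dy k hdz hdy h2).symm
    have hz : z1 + (k:Int)*sz + sz = z1 + ((k+1:Nat):Int)*sz := by push_cast; ring
    have hk1 : ((k+1:Nat):Int) + n = dz := by push_cast; push_cast at hk; omega
    have hcast : ((k+1:Nat):Int) = (k:Int) + 1 := by push_cast; ring
    rw [hx, hy, he1, he2, hz, ← hcast, ih (k+1) hk1]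
    refine congrArg₂ List.cons (by simp) ?_
    apply List.map_congr_left
    intro j hj
    simp only [Function.comp_apply]
    have hjk : ((k+1:Nat):Int) + (j:Int) = (k:Int) + ((Nat.succ j : Nat):Int) := by push_cast; ring
    rw [hjk]

-- ===== VERDICT (by name: the statement is the Claim_ definition above) =====
theorem bresenham_3d_spec : Claim_equal_bresenham_3d := by
  intro p1 p2 _hDom
  obtain ⟨x1, y1, z1⟩ := p1
  obtain ⟨x2, y2, z2⟩ := p2
  unfold Spec_bresenham_3d bresenham_3d bresenham_3d_alt
  simp only []
  set dx := |x2 - x1| with hdxdef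
  set dy := |y2 - y1| with hdydef
  set dz := |z2 - z1| with hdzdef
  set sx := (if x1 < x2 then (1:Int) else -1) with hsxdef
  set sy := (if y1 < y2 then (1:Int) else -1) with hsydef
  set sz := (if z1 < z2 then (1:Int) else -1) with hszdef
  have hdx0 : 0 ≤ dx := hdxdef ▸ abs_nonneg _
  have hdy0 : 0 ≤ dy := hdydef ▸ abs_nonneg _
  have hdz0 : 0 ≤ dz := hdzdef ▸ abs_nonneg _
  have hsx : sx = 1 ∨ sx = -1 := by rw [hsxdef]; split_ifs <;> simp
  have hsy : sy = 1 ∨ sy = -1 := by rw [hsydef]; split_ifs <;> simp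
  have hsz : sz = 1 ∨ sz = -1 := by rw [hszdef]; split_ifs <;> simp
  have hx2 : x2 = x1 + sx * dx := by
    rw [hsxdef, hdxdef]
    rcases lt_trichotomy x1 x2 with h | h | h
    · rw [if_pos h, abs_of_nonneg (by omega)]; ring
    · rw [if_neg (by omega), abs_of_nonpos (by omega)]; ring
    · rw [if_neg (by omega), abs_of_nonpos (by omega)]; ring
  have hy2 : y2 = y1 + sy * dy := by
    rw [hsydef, hdydef]
    rcases lt_trichotomy y1 y2 with h | h | h
    · rw [if_pos h, abs_of_nonneg (by omega)]; ring
    · rw [if_neg (by omega), abs_of_nonpos (by omega)]; ring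
    · rw [if_neg (by omega), abs_of_nonpos (by omega)]; ring
  have hz2 : z2 = z1 + sz * dz := by
    rw [hszdef, hdzdef]
    rcases lt_trichotomy z1 z2 with h | h | h
    · rw [if_pos h, abs_of_nonneg (by omega)]; ring
    · rw [if_neg (by omega), abs_of_nonpos (by omega)]; ring
    · rw [if_neg (by omega), abs_of_nonpos (by omega)]; ring
  split_ifs with hc1 hc2
  · -- x major
    by_cases h0 : dx = 0
    · simp [h0, pvLoopX]
    · have hdx : 0 < dx := by omega
      have hE1 : pvE dx dy 0 = 2*dy - dx := by unfold pvE; rw [pvC_zero dx dy hdx]; ring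
      have hE2 : pvE dx dz 0 = 2*dz - dx := by unfold pvE; rw [pvC_zero dx dz hdx]; ring
      have hnt : dx.toNat = dx.natAbs := by omega
      have key := pvLoopX_eq x1 y1 z1 sx sy sz dx dy dz hdx hdy0 hdz0 hc1.1 hc1.2 hsx
        dx.natAbs 0 (by omega)
      simp only [Nat.cast_zero, zero_mul, add_zero, zero_add, mul_zero, hE1, hE2, pvC_zero dx dy hdx, pvC_zero dx dz hdx] at key
      rw [hx2, key, hnt]
      apply List.map_congr_left
      intro j hj
      simp [pvC, PySem.Int.floordiv_eq_ediv_of_pos (show (0:Int) < 2*dx by omega)]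
  · -- y major
    by_cases h0 : dy = 0
    · simp [h0, pvLoopY]
    · have hdy : 0 < dy := by omega
      have hE1 : pvE dy dx 0 = 2*dx - dy := by unfold pvE; rw [pvC_zero dy dx hdy]; ring
      have hE2 : pvE dy dz 0 = 2*dz - dy := by unfold pvE; rw [pvC_zero dy dz hdy]; ring
      have hnt : dy.toNat = dy.natAbs := by omega
      have key := pvLoopY_eq x1 y1 z1 sx sy sz dx dy dz hdy hdx0 hdz0 hc2.1 hc2.2 hsy
        dy.natAbs 0 (by omega)
      simp only [Nat.cast_zero, zero_mul, add_zero, zero_add, mul_zero, hE1, hE2, pvC_zero dy dx hdy, pvC_zero dy dz hdy] at key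
      rw [hy2, key, hnt]
      apply List.map_congr_left
      intro j hj
      simp [pvC, PySem.Int.floordiv_eq_ediv_of_pos (show (0:Int) < 2*dy by omega)]
  · -- z major
    have hzx : dx ≤ dz ∧ dy ≤ dz := by
      constructor <;> by_contra h <;> omega
    by_cases h0 : dz = 0
    · simp [h0, pvLoopZ]
    · have hdz : 0 < dz := by omega
      have hE1 : pvE dz dx 0 = 2*dx - dz := by unfold pvE; rw [pvC_zero dz dx hdz]; ring
      have hE2 : pvE dz dy 0 = 2*dy - dz := by unfold pvE; rw [pvC_zero dz dy hdz]; ring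
      have hnt : dz.toNat = dz.natAbs := by omega
      have key := pvLoopZ_eq x1 y1 z1 sx sy sz dx dy dz hdz hdx0 hdy0 hzx.1 hzx.2 hsz
        dz.natAbs 0 (by omega)
      simp only [Nat.cast_zero, zero_mul, add_zero, zero_add, mul_zero, hE1, hE2, pvC_zero dz dx hdz, pvC_zero dz dy hdz] at key
      rw [hz2, key, hnt]
      apply List.map_congr_left
      intro j hj
      simp [pvC, PySem.Int.floordiv_eq_ediv_of_pos (show (0:Int) < 2*dz by omega)]
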